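-- pv_equiv track=rewrite | github.com/ankitshah009/leetcode_python | graphs/1694-reformat_phone_number.py | reformatNumber
-- ===== SOURCE A (Python) =====
-- def reformatNumber(number: str) -> str:
--     """
--     Compact solution.
--     """
--     d = ''.join(filter(str.isdigit, number))
--     n, res, i = len(d), [], 0
--
--     while n - i > 4:
--         res.append(d[i:i+3])
--         i += 3
--
--     rem = n - i
--     if rem == 4:
--         res += [d[i:i+2], d[i+2:]]
--     else:
--         res.append(d[i:])
--
--     return '-'.join(res)
-- ===== SOURCE B (Python) =====
-- def reformatNumber(number: str) -> str:
--     """Chunk all digits uniformly into 3s, then fix the tail: a trailing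
--     1-digit group borrows one digit from the previous group (2+2, not 3+1)."""
--     d = ''.join(c for c in number if c.isdigit())
--     groups = []
--     rest = d
--     while rest:
--         groups.append(rest[:3])
--         rest = rest[3:]
--     if len(groups) >= 2 and len(groups[-1]) == 1:
--         last = groups.pop()
--         prev = groups.pop()
--         groups += [prev[:2], prev[2:] + last]
--     return '-'.join(groups)
-- ===== Notes on version B (the rewrite author's own statement) =====
-- stated objective: alternative
-- what changed: A decides each group's size with a look-ahead (emit 3 while more than 4 digits remain, then split the 4/≤3 tail); B chunks all digits uniformly into 3s first and afterwards repairs a trailing 1-digit group by borrowing a digit from the previous group.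
import Mathlib
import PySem

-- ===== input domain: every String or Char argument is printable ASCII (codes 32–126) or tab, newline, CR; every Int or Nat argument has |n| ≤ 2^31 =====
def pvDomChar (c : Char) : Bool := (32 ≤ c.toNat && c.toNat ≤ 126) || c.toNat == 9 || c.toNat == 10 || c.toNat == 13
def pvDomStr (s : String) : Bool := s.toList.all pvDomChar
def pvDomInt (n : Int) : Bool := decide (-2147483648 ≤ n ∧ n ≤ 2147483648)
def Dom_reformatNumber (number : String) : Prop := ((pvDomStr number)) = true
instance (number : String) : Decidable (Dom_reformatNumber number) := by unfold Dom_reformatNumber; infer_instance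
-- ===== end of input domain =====

-- B replaces A's look-ahead loop (group sizes decided before emitting) by a
-- uniform chunk-into-3s pass followed by a tail repair; same O(n) cost, different decomposition.


-- ===== PORT A =====
-- A's while-loop 'while n - i > 4: res.append(d[i:i+3]); i += 3' advances an index;
-- ported as structural recursion on the suffix d[i:], where d[i:i+3] is (take 3) of the suffix.
def pvChunkA (rest : List Char) : List (List Char) :=
  if rest.length > 4 then rest.take 3 :: pvChunkA (rest.drop 3)
  else if rest.length = 4 then [rest.take 2, rest.drop 2]
  else [rest]
termination_by rest.length
decreasing_by simp [List.length_drop]; omega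

def reformatNumber (number : String) : String :=
  String.ofList (PySem.Chars.join ['-'] (pvChunkA (number.toList.filter PySem.Chars.isdigit)))

-- ===== PORT B =====
-- Source B's 'while rest: groups.append(rest[:3]); rest = rest[3:]'
def pvChunk3 (rest : List Char) : List (List Char) :=
  if rest.isEmpty then [] else rest.take 3 :: pvChunk3 (rest.drop 3)
termination_by rest.length
decreasing_by
  rename_i h; simp [List.isEmpty_iff] at h
  have := List.length_pos_of_ne_nil h
  simp [List.length_drop]; omega

-- Source B's tail repair: two pops, then append prev[:2] and prev[2:]+last
def pvFixTail (gs : List (List Char)) : List (List Char) :=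
  if 2 ≤ gs.length ∧ (gs.getLastD []).length = 1 then
    gs.dropLast.dropLast ++
      [(gs.dropLast.getLastD []).take 2, (gs.dropLast.getLastD []).drop 2 ++ gs.getLastD []]
  else gs

def reformatNumber_alt (number : String) : String :=
  String.ofList (PySem.Chars.join ['-'] (pvFixTail (pvChunk3 (number.toList.filter PySem.Chars.isdigit))))

-- ===== PRECONDITION & SPEC =====
def Spec_reformatNumber (number : String) (out : String) : Prop := out = reformatNumber_alt number
instance (number : String) (out : String) : Decidable (Spec_reformatNumber number out) := by unfold Spec_reformatNumber; infer_instance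

-- ===== CLAIM (what is proved, stated in full; the proofs are below) =====
def Claim_equal_reformatNumber : Prop := ∀ (number : String), Dom_reformatNumber number → Spec_reformatNumber number (reformatNumber number)

-- ===== LEMMAS AND PROOFS =====

-- every list of length ≥ 2 ends in two elements
lemma pv_ex_two {α : Type} (gs : List α) (h : 2 ≤ gs.length) :
    ∃ ys x y, gs = ys ++ [x, y] := by
  rcases hr : gs.reverse with _ | ⟨y, t⟩
  · simp [List.reverse_eq_nil_iff] at hr; subst hr; simp at h
  · rcases t with _ | ⟨x, t2⟩
    · have := congrArg List.length hr; simp at this; omega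
    · refine ⟨t2.reverse, x, y, ?_⟩
      have := congrArg List.reverse hr
      simpa using this

lemma pvFixTail_two (ys : List (List Char)) (x y : List Char) :
    pvFixTail (ys ++ [x, y]) =
      if y.length = 1 then ys ++ [x.take 2, x.drop 2 ++ y] else ys ++ [x, y] := by
  have h1 : ys ++ [x, y] = (ys ++ [x]) ++ [y] := by simp
  unfold pvFixTail
  rw [h1]
  simp

lemma pvFixTail_cons (t : List Char) (gs : List (List Char)) (h : 2 ≤ gs.length) :
    pvFixTail (t :: gs) = t :: pvFixTail gs := by
  obtain ⟨ys, x, y, rfl⟩ := pv_ex_two gs h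
  have h2 : t :: (ys ++ [x, y]) = (t :: ys) ++ [x, y] := by simp
  rw [h2, pvFixTail_two, pvFixTail_two]
  split <;> simp

lemma pvChunk3_short (d : List Char) (hne : d ≠ []) (h : d.length ≤ 3) :
    pvChunk3 d = [d] := by
  rw [pvChunk3.eq_def]
  simp [List.isEmpty_iff, hne, List.take_of_length_le h, List.drop_eq_nil_of_le h]
  rw [pvChunk3.eq_def]; simp

lemma pvChunk3_ne_nil (d : List Char) (hne : d ≠ []) : pvChunk3 d ≠ [] := by
  rw [pvChunk3.eq_def]; simp [List.isEmpty_iff, hne]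

lemma pv_key : ∀ (n : Nat) (d : List Char), d.length ≤ n → d ≠ [] →
    pvChunkA d = pvFixTail (pvChunk3 d) := by
  intro n
  induction n with
  | zero =>
    intro d h hne
    rw [List.length_eq_zero_iff.mp (Nat.le_zero.mp h)] at hne
    exact absurd rfl hne
  | succ n ih =>
    intro d hlen hne
    have hpos : 0 < d.length := List.length_pos_of_ne_nil hne
    by_cases h4 : d.length > 4
    · -- long case: both emit (take 3) and recurse / chunk the rest
      have hdne : d.drop 3 ≠ [] := by
        intro hc; have := congrArg List.length hc; simp at this; omega
      have hdlen : (d.drop 3).length ≤ n := by simp; omega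
      rw [pvChunkA]; simp only [h4, if_pos]
      rw [pvChunk3.eq_def]; simp only [List.isEmpty_iff, hne, if_false]
      rw [ih (d.drop 3) hdlen hdne]
      by_cases hm : (d.drop 3).length ≤ 3
      · -- remainder fits in one chunk of length 2 or 3: no tail fix either way
        rw [pvChunk3_short _ hdne hm]
        have h2 : d.take 3 :: [d.drop 3] = [] ++ [d.take 3, d.drop 3] := by simp
        rw [h2, pvFixTail_two]
        rw [if_neg (by simp; omega : ¬ (List.drop 3 d).length = 1)]
        unfold pvFixTail; simp
      · -- remainder still chunks into ≥ 2 groups: fix commutes with the cons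
        have hlen2 : 2 ≤ (pvChunk3 (d.drop 3)).length := by
          rw [pvChunk3.eq_def]; simp [List.isEmpty_iff, hdne]
          have hm' : 4 ≤ (List.drop 3 d).length := by omega
          simp at hm'
          have h6 : List.drop 6 d ≠ [] := by
            intro hc; have := congrArg List.length hc; simp at this; omega
          exact List.length_pos_of_ne_nil (pvChunk3_ne_nil _ h6)
        rw [pvFixTail_cons _ _ hlen2]
    · by_cases hq : d.length = 4
      · -- length 4: A splits 2+2; B chunks 3+1 then repairs to 2+2
        rw [pvChunkA]; simp only [hq, if_pos]
        have hdne : d.drop 3 ≠ [] := by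
          intro hc; have := congrArg List.length hc; simp at this; omega
        rw [pvChunk3.eq_def]; simp only [List.isEmpty_iff, hne, if_false]
        rw [pvChunk3_short _ hdne (by simp; omega)]
        have h2 : d.take 3 :: [d.drop 3] = [] ++ [d.take 3, d.drop 3] := by simp
        rw [h2, pvFixTail_two]
        have hlast : (d.drop 3).length = 1 := by simp; omega
        simp only [hlast, if_pos, List.nil_append]
        have e1 : (d.take 3).take 2 = d.take 2 := by
          simp [List.take_take]
        have e2 : (d.take 3).drop 2 ++ d.drop 3 = d.drop 2 := by
          rw [List.drop_take]
          have h3 : List.drop 1 (List.drop 2 d) = List.drop 3 d := by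
            rw [List.drop_drop]
          rw [← h3]
          simpa using List.take_append_drop 1 (d.drop 2)
        rw [e1, e2]
        norm_num
      · -- length 1..3: a single group on both sides
        have h3 : d.length ≤ 3 := by omega
        rw [pvChunkA]; simp only [h4, hq, if_false]
        rw [pvChunk3_short _ hne h3]
        unfold pvFixTail; simp

-- ===== VERDICT (by name: the statement is the Claim_ definition above) =====
theorem reformatNumber_spec : Claim_equal_reformatNumber := by
  intro number _
  unfold Spec_reformatNumber reformatNumber reformatNumber_alt
  set d := number.toList.filter PySem.Chars.isdigit with hd
  by_cases hne : d = []
  · rw [hne]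
    rw [pvChunkA, pvChunk3]
    simp [pvFixTail, PySem.Chars.join_singleton, PySem.Chars.join_nil]
  · rw [pv_key d.length d le_rfl hne]
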